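-- pv_equiv track=rewrite | github.com/iboxl/112 | Architecture/ArchSpec.py | find_lastMem_index
-- ===== SOURCE A (Python) =====
-- def find_lastMem_index(mapArray, idx):
--     count = 0
--     for i in range(len(mapArray) - 1, -1, -1):
--         if mapArray[i] == 1:
--             count += 1
--             if count == idx:
--                 return i
--     return -1
-- ===== SOURCE B (Python) =====
-- def find_lastMem_index(mapArray, idx):
--     positions = [i for i, v in enumerate(mapArray) if v == 1]
--     if 1 <= idx <= len(positions):
--         return positions[len(positions) - idx]
--     return -1
-- ===== Notes on version B (the rewrite author's own statement) =====
-- stated objective: alternative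
-- what changed: Replaces the backward count-until-match scan with a forward pass that materializes all indices of 1s and then returns the idx-th from the end by direct indexing with an explicit guard.
import Mathlib
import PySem

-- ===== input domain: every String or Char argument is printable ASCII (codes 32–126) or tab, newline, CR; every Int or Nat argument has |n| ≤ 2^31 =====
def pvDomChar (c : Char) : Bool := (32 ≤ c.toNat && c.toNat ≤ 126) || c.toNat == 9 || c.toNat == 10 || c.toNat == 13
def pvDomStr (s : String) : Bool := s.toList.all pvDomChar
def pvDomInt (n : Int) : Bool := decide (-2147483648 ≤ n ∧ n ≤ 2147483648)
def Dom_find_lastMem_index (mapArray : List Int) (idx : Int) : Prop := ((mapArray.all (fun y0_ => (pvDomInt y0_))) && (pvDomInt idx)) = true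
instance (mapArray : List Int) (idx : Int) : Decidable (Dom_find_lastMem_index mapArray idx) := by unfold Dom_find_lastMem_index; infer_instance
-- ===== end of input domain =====

-- B replaces A's backward count-until-match scan by a forward pass collecting the
-- indices of 1s and a direct from-the-end lookup (alternative decomposition, same cost).

-- ===== PORT A =====
-- the 'for i in range(len(mapArray)-1, -1, -1)' loop with early return, as recursion
-- over the countdown index list; count is the running counter. The index i is always
-- in range, so the pyGetD default 0 is never used.
def pvGoA (mapArray : List Int) (idx : Int) : List Int → Int → Int
  | [], _ => -1
  | i :: rest, count =>
    if PySem.List.pyGetD mapArray i 0 == 1 then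
      if count + 1 == idx then i else pvGoA mapArray idx rest (count + 1)
    else pvGoA mapArray idx rest count

def find_lastMem_index (mapArray : List Int) (idx : Int) : Int :=
  pvGoA mapArray idx (PySem.List.pyRange ((mapArray.length : Int) - 1) (-1) (-1)) 0

-- ===== PORT B =====
-- positions = [i for i, v in enumerate(mapArray) if v == 1]; guarded direct lookup
-- (the index len(positions) - idx is in range whenever the guard holds).
def find_lastMem_index_alt (mapArray : List Int) (idx : Int) : Int :=
  let positions := ((PySem.List.enumerate mapArray 0).filter (fun p => p.2 == 1)).map (·.1)
  if 1 ≤ idx ∧ idx ≤ (positions.length : Int) then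
    PySem.List.pyGetD positions ((positions.length : Int) - idx) (-1)
  else -1

-- ===== PRECONDITION & SPEC =====
def Spec_find_lastMem_index (mapArray : List Int) (idx : Int) (out : Int) : Prop := out = find_lastMem_index_alt mapArray idx
instance (mapArray : List Int) (idx : Int) (out : Int) : Decidable (Spec_find_lastMem_index mapArray idx out) := by unfold Spec_find_lastMem_index; infer_instance

-- ===== CLAIM (what is proved, stated in full; the proofs are below) =====
def Claim_equal_find_lastMem_index : Prop := ∀ (mapArray : List Int) (idx : Int), Dom_find_lastMem_index mapArray idx → Spec_find_lastMem_index mapArray idx (find_lastMem_index mapArray idx)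

-- ===== LEMMAS AND PROOFS =====

-- the list of indices of 1s (B's 'positions')
def pvPositions (m : List Int) : List Int :=
  ((PySem.List.enumerate m 0).filter (fun p => p.2 == 1)).map (·.1)

-- A's result generalized over the running counter c
def pvAltGen (m : List Int) (idx c : Int) : Int :=
  if c < idx ∧ idx ≤ c + ((pvPositions m).length : Int) then
    PySem.List.pyGetD (pvPositions m) (((pvPositions m).length : Int) - (idx - c)) (-1)
  else -1

theorem pvEnumerate_append (xs ys : List Int) (s : Int) :
    PySem.List.enumerate (xs ++ ys) s = PySem.List.enumerate xs s ++ PySem.List.enumerate ys (s + xs.length) := by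
  induction xs generalizing s with
  | nil => simp [PySem.List.enumerate_nil]
  | cons x xs ih =>
    simp [PySem.List.enumerate_cons, ih (s + 1)]
    ring_nf

theorem pvPositions_append (m : List Int) (x : Int) :
    pvPositions (m ++ [x]) = pvPositions m ++ (if x == 1 then [(m.length : Int)] else []) := by
  unfold pvPositions
  rw [pvEnumerate_append]
  by_cases h : x = 1 <;>
    simp [PySem.List.enumerate_cons, PySem.List.enumerate_nil, List.filter_append, h]

theorem pvGoA_append (m : List Int) (x idx : Int) (l : List Int)
    (hl : ∀ i ∈ l, 0 ≤ i ∧ i < (m.length : Int)) (c : Int) :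
    pvGoA (m ++ [x]) idx l c = pvGoA m idx l c := by
  induction l generalizing c with
  | nil => rfl
  | cons i rest ih =>
    have hi := hl i (by simp)
    have hget : PySem.List.pyGetD (m ++ [x]) i 0 = PySem.List.pyGetD m i 0 := by
      rw [PySem.List.pyGetD_eq_getElem _ _ hi.1 (by simp; omega),
          PySem.List.pyGetD_eq_getElem _ _ hi.1 (by exact_mod_cast hi.2)]
      rw [List.getElem_append_left]
    have hrest : ∀ j ∈ rest, 0 ≤ j ∧ j < (m.length : Int) := fun j hj => hl j (by simp [hj])
    simp only [pvGoA, hget]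
    split_ifs <;> first | rfl | exact ih hrest _

theorem pvGoA_eq_altGen (m : List Int) (idx : Int) : ∀ c : Int,
    pvGoA m idx (PySem.List.pyRange ((m.length : Int) - 1) (-1) (-1)) c = pvAltGen m idx c := by
  induction m using List.reverseRecOn with
  | nil =>
    intro c
    rw [PySem.List.pyRange_neg_one_eq_nil (by norm_num)]
    simp [pvGoA, pvAltGen, pvPositions, PySem.List.enumerate_nil]
  | append_singleton m x ih =>
    intro c
    have hn : ((m ++ [x]).length : Int) - 1 = (m.length : Int) := by simp
    rw [hn, PySem.List.pyRange_neg_one_cons (by omega)]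
    have hget : PySem.List.pyGetD (m ++ [x]) (m.length : Int) 0 = x := by
      rw [PySem.List.pyGetD_eq_getElem _ _ (by positivity) (by simp)]
      simp
    have hmem : ∀ i ∈ PySem.List.pyRange ((m.length : Int) - 1) (-1) (-1),
        0 ≤ i ∧ i < (m.length : Int) := by
      intro i hi
      rw [PySem.List.mem_pyRange_neg_one] at hi
      omega
    have hP := pvPositions_append m x
    simp only [pvGoA, hget]
    by_cases hx : x = 1
    · subst hx
      simp only [beq_self_eq_true, if_true] at hP ⊢
      have hPlen : ((pvPositions (m ++ [1])).length : Int) = (pvPositions m).length + 1 := by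
        rw [hP]; simp
      by_cases hc : c + 1 = idx
      · simp only [hc, beq_self_eq_true, if_true]
        unfold pvAltGen
        rw [hP]
        simp only [List.length_append, List.length_singleton, Nat.cast_add, Nat.cast_one]
        rw [if_pos (by omega)]
        rw [(by omega : ((pvPositions m).length : Int) + 1 - (idx - c) = ((pvPositions m).length : Int))]
        rw [PySem.List.pyGetD_eq_getElem _ _ (by positivity) (by simp)]
        simp
      · rw [if_neg (by simpa using hc), pvGoA_append m 1 idx _ hmem, ih (c + 1)]
        unfold pvAltGen
        by_cases hcond : c + 1 < idx ∧ idx ≤ c + 1 + ((pvPositions m).length : Int)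
        · rw [if_pos hcond, hP]
          simp only [List.length_append, List.length_singleton, Nat.cast_add, Nat.cast_one]
          rw [if_pos (by omega)]
          rw [PySem.List.pyGetD_eq_getElem _ _ (by omega) (by omega),
              PySem.List.pyGetD_eq_getElem _ _ (by omega) (by simp; omega)]
          rw [List.getElem_append_left (by omega)]
          congr 1
          omega
        · rw [if_neg hcond, hP]
          simp only [List.length_append, List.length_singleton, Nat.cast_add, Nat.cast_one]
          rw [if_neg (by omega)]
    · have hx' : (x == 1) = false := by simp [hx]
      simp only [hx', Bool.false_eq_true, if_false] at hP ⊢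
      rw [pvGoA_append m x idx _ hmem, ih c]
      unfold pvAltGen
      rw [hP]
      simp

-- ===== VERDICT (by name: the statement is the Claim_ definition above) =====
theorem find_lastMem_index_spec : Claim_equal_find_lastMem_index := by
  intro mapArray idx _
  unfold Spec_find_lastMem_index find_lastMem_index find_lastMem_index_alt
  rw [pvGoA_eq_altGen mapArray idx 0]
  unfold pvAltGen pvPositions
  simp only [zero_add, sub_zero]
  by_cases h : 1 ≤ idx ∧ idx ≤ ((((PySem.List.enumerate mapArray 0).filter (fun p => p.2 == 1)).map (·.1)).length : Int)
  · rw [if_pos (by omega), if_pos h]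
  · rw [if_neg (by omega), if_neg h]
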